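-- pv_equiv track=rewrite | github.com/juliantrue/GregoBaseExtract | scripts/extract_tables.py | _split_insert
-- ===== SOURCE A (Python) =====
-- from typing import Iterator, List, Tuple
--
-- def _split_insert(chunk: str) -> Tuple[List[str] | None, str | None]:
--     """Split an INSERT chunk into column list and VALUES blob."""
--     try:
--         pos_open = chunk.index("(")
--         pos_close = chunk.index(")", pos_open + 1)
--         cols_str = chunk[pos_open + 1 : pos_close]
--
--         rest = chunk[pos_close + 1 :]
--         kw = "VALUES"
--         idx_vals = rest.upper().find(kw)
--         if idx_vals < 0:
--             return None, None
--         values_blob = rest[idx_vals + len(kw) :].rstrip(";\n\r ")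
--
--         cols = [c.strip().strip("`") for c in cols_str.split(",")]
--         return cols, values_blob
--     except ValueError:
--         return None, None
-- ===== SOURCE B (Python) =====
-- def _split_insert(chunk):
--     """Split an INSERT chunk into column list and VALUES blob.
--
--     Single left-to-right scan with an explicit state machine: state 0 looks for
--     '(', state 1 collects columns (pushed on ',' and on the closing ')'), state 2
--     matches the keyword VALUES case-insensitively with a progress counter (valid
--     because the letters of 'VALUES' are pairwise distinct, so on a mismatch the
--     only possible restart is a fresh 'V')."""
--     KW = "VALUES"
--     state = 0
--     cols, cur = [], []
--     progress = 0
--     for i, ch in enumerate(chunk):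
--         if state == 0:
--             if ch == '(':
--                 state = 1
--         elif state == 1:
--             if ch == ')':
--                 cols.append(''.join(cur).strip().strip('`'))
--                 state = 2
--             elif ch == ',':
--                 cols.append(''.join(cur).strip().strip('`'))
--                 cur = []
--             else:
--                 cur.append(ch)
--         else:
--             u = ch.upper()
--             if u == KW[progress]:
--                 progress += 1
--                 if progress == len(KW):
--                     return cols, chunk[i + 1:].rstrip(";\n\r ")
--             else:
--                 progress = 1 if u == 'V' else 0
--     return None, None
-- ===== Notes on version B (the rewrite author's own statement) =====
-- stated objective: alternative
-- what changed: Replaces A's staged index()/find()/slice passes with one left-to-right character scan driven by an explicit state machine (seek '(', accumulate columns pushed at ',' and ')', then match VALUES case-insensitively with a progress counter, valid since the letters of VALUES are pairwise distinct), so no substring search or slicing pass remains.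
import Mathlib
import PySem

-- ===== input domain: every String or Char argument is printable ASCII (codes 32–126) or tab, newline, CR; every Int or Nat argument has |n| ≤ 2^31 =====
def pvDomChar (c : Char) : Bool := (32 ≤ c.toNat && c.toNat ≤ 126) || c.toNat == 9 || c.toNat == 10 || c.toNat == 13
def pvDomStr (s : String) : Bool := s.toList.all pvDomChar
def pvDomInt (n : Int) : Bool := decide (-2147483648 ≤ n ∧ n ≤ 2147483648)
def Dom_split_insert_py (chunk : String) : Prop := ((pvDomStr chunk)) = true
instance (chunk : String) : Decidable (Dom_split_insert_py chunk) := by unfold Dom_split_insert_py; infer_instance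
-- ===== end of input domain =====

-- B replaces A's staged index/find/slice passes with ONE left-to-right character scan driven by an
-- explicit state machine (seek '(', collect columns, match VALUES with a progress counter); objective:
-- alternative algorithm, same cost.

-- ===== PORT A =====
-- hand port of s.rstrip(chars): drop trailing characters belonging to `chars` (exact)
def rstripCharsPort (cs chars : List Char) : List Char :=
  (cs.reverse.dropWhile (fun c => chars.contains c)).reverse

-- the per-column post-processing c.strip().strip("`") shared verbatim by A and B
def colClean (c : List Char) : List Char :=
  PySem.Chars.stripChars (PySem.Chars.strip c) ['`']

def split_insert_py (chunk : String) : Option (List String) × Option String :=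
  let cs := chunk.toList
  let posOpen := PySem.Chars.find cs ['(']          -- chunk.index("(")
  if posOpen = -1 then (none, none)                  -- ValueError → (None, None)
  else
    let posClose := PySem.Chars.findFrom cs [')'] (posOpen + 1) none   -- chunk.index(")", pos_open+1)
    if posClose = -1 then (none, none)               -- ValueError → (None, None)
    else
      let colsStr := PySem.Chars.slice cs (some (posOpen + 1)) (some posClose)
      let rest := PySem.Chars.slice cs (some (posClose + 1)) none
      let idxVals := PySem.Chars.find (PySem.Chars.upper rest) "VALUES".toList
      if idxVals < 0 then (none, none)
      else
        let valuesBlob := rstripCharsPort (PySem.Chars.slice rest (some (idxVals + 6)) none) [';', '\n', '\r', ' ']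
        let cols := (PySem.Chars.splitOn colsStr [',']).map colClean
        (some (cols.map String.ofList), some (String.ofList valuesBlob))

-- ===== PORT B =====
-- the keyword VALUES as a character list
def kwV : List Char := ['V', 'A', 'L', 'U', 'E', 'S']

-- state 2 of the scan: match VALUES case-insensitively with a progress counter
def scanVals (cs : List Char) (progress : Nat) (cols : List (List Char)) :
    Option (List String) × Option String :=
  match cs with
  | [] => (none, none)
  | c :: t =>
    let u := PySem.Chars.upperChar c                 -- ch.upper()
    if u = kwV.getD progress ' ' then
      if progress + 1 = 6 then
        (some (cols.map String.ofList),
         some (String.ofList (rstripCharsPort t [';', '\n', '\r', ' '])))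
      else scanVals t (progress + 1) cols
    else scanVals t (if u = 'V' then 1 else 0) cols

-- state 1 of the scan: collect columns, pushed at ',' and at the closing ')'
def scanCols (cs : List Char) (cur : List Char) (cols : List (List Char)) :
    Option (List String) × Option String :=
  match cs with
  | [] => (none, none)
  | c :: t =>
    if c = ')' then scanVals t 0 (cols ++ [colClean cur])
    else if c = ',' then scanCols t [] (cols ++ [colClean cur])
    else scanCols t (cur ++ [c]) cols

-- state 0 of the scan: seek the opening '('
def scanOpen (cs : List Char) : Option (List String) × Option String :=
  match cs with
  | [] => (none, none)
  | c :: t => if c = '(' then scanCols t [] [] else scanOpen t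

def split_insert_py_alt (chunk : String) : Option (List String) × Option String :=
  scanOpen chunk.toList

-- ===== PRECONDITION & SPEC =====
def Spec_split_insert_py (chunk : String) (out : Option (List String) × Option String) : Prop := out = split_insert_py_alt chunk
instance (chunk : String) (out : Option (List String) × Option String) : Decidable (Spec_split_insert_py chunk out) := by unfold Spec_split_insert_py; infer_instance

-- ===== CLAIM (what is proved, stated in full; the proofs are below) =====
def Claim_equal_split_insert_py : Prop := ∀ (chunk : String), Dom_split_insert_py chunk → Spec_split_insert_py chunk (split_insert_py chunk)

-- ===== LEMMAS AND PROOFS =====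

-- a successful find with a nonempty needle points strictly inside the haystack
theorem find_toNat_lt {cs sub : List Char} (hne : sub ≠ [])
    (h : 0 ≤ PySem.Chars.find cs sub) : (PySem.Chars.find cs sub).toNat < cs.length := by
  have hp := (PySem.Chars.find_spec h).1
  by_contra hge
  push Not at hge
  rw [List.drop_eq_nil_of_le hge] at hp
  exact hne (List.prefix_nil.mp hp)

theorem upper_cons (c : Char) (t : List Char) :
    PySem.Chars.upper (c :: t) = PySem.Chars.upperChar c :: PySem.Chars.upper t := by
  simp [PySem.Chars.upper]

-- find = -1 iff the needle occurs at no drop position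
theorem find_eq_neg_one_iff' (s sub : List Char) :
    PySem.Chars.find s sub = -1 ↔ ∀ j, ¬ sub <+: s.drop j := by
  rw [PySem.Chars.find_eq_neg_one_iff, ← PySem.Chars.isIn_iff_infix,
      ← PySem.Chars.exists_prefix_drop_iff_isIn]
  push Not
  rfl

theorem find_eq_zero_of_prefix {s sub : List Char} (h : sub <+: s) :
    PySem.Chars.find s sub = 0 := by
  have hnn : 0 ≤ PySem.Chars.find s sub := by
    rw [PySem.Chars.find_nonneg_iff]
    exact h.isInfix
  have hspec := (PySem.Chars.find_spec hnn).2
  by_contra hne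
  have hpos : 0 < (PySem.Chars.find s sub).toNat := by omega
  exact hspec 0 hpos (by simpa using h)

-- first occurrence shifts by d when no occurrence starts before position d
theorem find_shift {s sub : List Char} (d : Nat)
    (h : ∀ j < d, ¬ sub <+: s.drop j) :
    PySem.Chars.find s sub =
      if PySem.Chars.find (s.drop d) sub = -1 then -1
      else (d : Int) + PySem.Chars.find (s.drop d) sub := by
  split_ifs with hY
  · rw [find_eq_neg_one_iff'] at hY ⊢
    intro j hp
    rcases Nat.lt_or_ge j d with hj | hj
    · exact h j hj hp
    · refine hY (j - d) ?_
      rw [List.drop_drop]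
      have hjd : d + (j - d) = j := by omega
      rwa [hjd]
  · have hYnn : 0 ≤ PySem.Chars.find (s.drop d) sub := by
      have := PySem.Chars.neg_one_le_find (s.drop d) sub; omega
    obtain ⟨hYp, hYmin⟩ := PySem.Chars.find_spec hYnn
    set m := (PySem.Chars.find (s.drop d) sub).toNat with hm
    have hoccX : sub <+: s.drop (d + m) := by
      have := hYp
      rwa [List.drop_drop] at this
    have hXnn : 0 ≤ PySem.Chars.find s sub := by
      rw [PySem.Chars.find_nonneg_iff, ← PySem.Chars.isIn_iff_infix,
          ← PySem.Chars.exists_prefix_drop_iff_isIn]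
      exact ⟨d + m, hoccX⟩
    obtain ⟨hXp, hXmin⟩ := PySem.Chars.find_spec hXnn
    set M := (PySem.Chars.find s sub).toNat with hM
    have hMd : d ≤ M := by
      by_contra hlt
      exact h M (by omega) hXp
    have h1 : m ≤ M - d := by
      by_contra hlt
      refine hYmin (M - d) (by omega) ?_
      rw [List.drop_drop]
      have hMd' : d + (M - d) = M := by omega
      rwa [hMd']
    have h2 : M ≤ d + m := by
      by_contra hlt
      exact hXmin (d + m) (by omega) hoccX
    have : M = d + m := by omega
    omega

-- a needle longer than the haystack is absent
theorem find_of_short {s sub : List Char} (h : s.length < sub.length) :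
    PySem.Chars.find s sub = -1 := by
  rw [find_eq_neg_one_iff']
  intro j hp
  have := hp.length_le
  simp only [List.length_drop] at this
  omega

-- ---- splitOn on a single comma: the two facts the column invariant needs ----

theorem splitOn_go_no_comma (fuel : Nat) (l cur : List Char) (acc : List (List Char))
    (h : ',' ∉ l) :
    PySem.Chars.splitOn.go [','] fuel l cur acc = ((cur.reverse ++ l) :: acc).reverse := by
  induction fuel generalizing l cur with
  | zero => rfl
  | succ f ih =>
    cases l with
    | nil => simp [PySem.Chars.splitOn.go]
    | cons c t =>
      have hc : c ≠ ',' := fun hc => h (hc ▸ List.mem_cons_self)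
      have hpre : [','].isPrefixOf (c :: t) = false := by
        simp [List.isPrefixOf, Ne.symm hc]
      rw [PySem.Chars.splitOn.go, if_neg (by simp [hpre]),
          ih t (c :: cur) (fun hm => h (List.mem_cons_of_mem c hm))]
      simp

theorem splitOn_go_acc (fuel : Nat) (l cur : List Char) (acc : List (List Char)) :
    PySem.Chars.splitOn.go [','] fuel l cur acc
      = acc.reverse ++ PySem.Chars.splitOn.go [','] fuel l cur [] := by
  induction fuel generalizing l cur acc with
  | zero => simp [PySem.Chars.splitOn.go]
  | succ f ih =>
    cases l with
    | nil => simp [PySem.Chars.splitOn.go]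
    | cons c t =>
      by_cases hpre : [','].isPrefixOf (c :: t) = true
      · rw [PySem.Chars.splitOn.go, if_pos hpre, PySem.Chars.splitOn.go, if_pos hpre,
            ih _ _ (cur.reverse :: acc), ih _ _ [cur.reverse]]
        simp
      · rw [PySem.Chars.splitOn.go, if_neg hpre, PySem.Chars.splitOn.go, if_neg hpre,
            ih t (c :: cur) acc]

theorem splitOn_go_comma (pre : List Char) (fuel : Nat) (rest cur : List Char)
    (acc : List (List Char)) (h : ',' ∉ pre) (hf : (pre ++ ',' :: rest).length < fuel) :
    PySem.Chars.splitOn.go [','] fuel (pre ++ ',' :: rest) cur acc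
      = PySem.Chars.splitOn.go [','] (fuel - pre.length - 1) rest []
          ((cur.reverse ++ pre) :: acc) := by
  induction pre generalizing fuel cur with
  | nil =>
    cases fuel with
    | zero => simp at hf
    | succ f =>
      rw [List.nil_append, PySem.Chars.splitOn.go, if_pos (by simp [List.isPrefixOf])]
      simp
  | cons c p ih =>
    cases fuel with
    | zero => simp at hf
    | succ f =>
      have hc : c ≠ ',' := fun hc => h (hc ▸ List.mem_cons_self)
      rw [List.cons_append, PySem.Chars.splitOn.go,
          if_neg (by simp [List.isPrefixOf, Ne.symm hc]),
          ih f (c :: cur) (fun hm => h (List.mem_cons_of_mem c hm))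
            (by simpa using Nat.lt_of_succ_lt_succ hf)]
      simp only [List.reverse_cons, List.append_assoc, List.singleton_append,
        List.length_cons]
      congr 2
      omega

theorem splitOn_no_comma (pre : List Char) (h : ',' ∉ pre) :
    PySem.Chars.splitOn pre [','] = [pre] := by
  rw [PySem.Chars.splitOn, splitOn_go_no_comma _ _ _ _ h]
  simp

theorem splitOn_comma (pre rest : List Char) (h : ',' ∉ pre) :
    PySem.Chars.splitOn (pre ++ ',' :: rest) [','] = pre :: PySem.Chars.splitOn rest [','] := by
  rw [PySem.Chars.splitOn, splitOn_go_comma pre _ rest [] [] h (by simp)]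
  have hfuel : (pre ++ ',' :: rest).length + 1 - pre.length - 1 = rest.length + 1 := by
    simp; omega
  rw [hfuel, splitOn_go_acc, PySem.Chars.splitOn]
  simp

-- ---- stage 0: the scan for '(' computes A's first index search ----

theorem scanOpen_eq (cs : List Char) :
    scanOpen cs =
      if PySem.Chars.find cs ['('] = -1 then (none, none)
      else scanCols (cs.drop ((PySem.Chars.find cs ['(']).toNat + 1)) [] [] := by
  induction cs with
  | nil =>
    rw [if_pos (find_of_short (by decide))]
    rfl
  | cons c t ih =>
    by_cases hc : c = '('
    · subst hc
      rw [scanOpen, if_pos rfl, find_eq_zero_of_prefix (by simp)]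
      simp
    · have hnp : ¬ ['('] <+: (c :: t) := by
        simp [List.cons_prefix_cons, Ne.symm hc]
      have hsh := find_shift (s := c :: t) (sub := ['(']) 1
        (by intro j hj; interval_cases j; simpa using hnp)
      simp only [List.drop_succ_cons, List.drop_zero] at hsh
      rw [scanOpen, if_neg hc, ih, hsh]
      by_cases h1 : PySem.Chars.find t ['('] = -1
      · simp [h1]
      · have hnn : 0 ≤ PySem.Chars.find t ['('] := by
          have := PySem.Chars.neg_one_le_find t ['(']; omega
        have hne : ((1 : Nat) : Int) + PySem.Chars.find t ['('] ≠ -1 := by omega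
        have htn : (((1 : Nat) : Int) + PySem.Chars.find t ['(']).toNat
            = (PySem.Chars.find t ['(']).toNat + 1 := by omega
        simp only [if_neg h1, if_neg hne, htn, List.drop_succ_cons]

-- ---- stage 1: the column collector computes A's ')' search and comma split ----

theorem scanCols_eq (cs : List Char) : ∀ (cur : List Char) (cols : List (List Char)),
    ',' ∉ cur →
    scanCols cs cur cols =
      if PySem.Chars.find cs [')'] = -1 then (none, none)
      else scanVals (cs.drop ((PySem.Chars.find cs [')']).toNat + 1)) 0
        (cols ++ (PySem.Chars.splitOn (cur ++ cs.take (PySem.Chars.find cs [')']).toNat) [',']).map colClean) := by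
  induction cs with
  | nil =>
    intro cur cols _
    rw [if_pos (find_of_short (by decide))]
    rfl
  | cons c t ih =>
    intro cur cols hcur
    by_cases hc : c = ')'
    · subst hc
      rw [scanCols, if_pos rfl, find_eq_zero_of_prefix (by simp)]
      simp [splitOn_no_comma cur hcur]
    · have hnp : ¬ [')'] <+: (c :: t) := by
        simp [List.cons_prefix_cons, Ne.symm hc]
      have hsh := find_shift (s := c :: t) (sub := [')']) 1
        (by intro j hj; interval_cases j; simpa using hnp)
      simp only [List.drop_succ_cons, List.drop_zero] at hsh
      rw [hsh]
      by_cases h1 : PySem.Chars.find t [')'] = -1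
      · by_cases hcomma : c = ','
        · subst hcomma
          rw [scanCols, if_neg hc, if_pos rfl, ih [] (cols ++ [colClean cur]) (by simp)]
          simp [h1]
        · rw [scanCols, if_neg hc, if_neg hcomma, ih (cur ++ [c]) cols (by
            intro hm
            rcases List.mem_append.mp hm with hm | hm
            · exact hcur hm
            · simp at hm; exact hcomma hm.symm)]
          simp [h1]
      · have hnn : 0 ≤ PySem.Chars.find t [')'] := by
          have := PySem.Chars.neg_one_le_find t [')']; omega
        have hne : ((1 : Nat) : Int) + PySem.Chars.find t [')'] ≠ -1 := by omega
        have htn : (((1 : Nat) : Int) + PySem.Chars.find t [')']).toNat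
            = (PySem.Chars.find t [')']).toNat + 1 := by omega
        by_cases hcomma : c = ','
        · subst hcomma
          rw [scanCols, if_neg hc, if_pos rfl, ih [] (cols ++ [colClean cur]) (by simp)]
          simp only [if_neg h1, if_neg hne, htn, List.drop_succ_cons, List.take_succ_cons,
            List.nil_append]
          rw [splitOn_comma cur _ hcur]
          simp
        · rw [scanCols, if_neg hc, if_neg hcomma, ih (cur ++ [c]) cols (by
            intro hm
            rcases List.mem_append.mp hm with hm | hm
            · exact hcur hm
            · simp at hm; exact hcomma hm.symm)]
          simp only [if_neg h1, if_neg hne, htn, List.drop_succ_cons, List.take_succ_cons,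
            List.append_assoc, List.singleton_append]

-- the mismatch case of stage 2: no occurrence of VALUES can start inside the matched prefix
-- (the letters of VALUES are pairwise distinct)
theorem no_occ_before (p : Nat) (hp : p ≤ 5) (u : Char) (L : List Char)
    (hu : u ≠ kwV.getD p ' ') :
    ∀ j < (if u = 'V' then p else p + 1), ¬ kwV <+: (kwV.take p ++ u :: L).drop j := by
  intro j hj
  by_cases hV : u = 'V'
  · rw [if_pos hV] at hj
    subst hV
    interval_cases p <;> interval_cases j <;>
      simp_all [kwV, List.cons_prefix_cons]
  · rw [if_neg hV] at hj
    interval_cases p <;> interval_cases j <;>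
      simp_all [kwV, List.cons_prefix_cons, eq_comm]

-- ---- stage 2: the progress-counter matcher computes A's case-insensitive VALUES search ----

theorem scanVals_eq (cs : List Char) : ∀ (p : Nat) (cols : List (List Char)), p ≤ 5 →
    scanVals cs p cols =
      (if PySem.Chars.find (kwV.take p ++ PySem.Chars.upper cs) kwV = -1 then (none, none)
       else (some (cols.map String.ofList),
         some (String.ofList (rstripCharsPort
           (cs.drop ((PySem.Chars.find (kwV.take p ++ PySem.Chars.upper cs) kwV).toNat + 6 - p))
           [';', '\n', '\r', ' '])))) := by
  induction cs with
  | nil =>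
    intro p cols hp
    rw [scanVals, if_pos (find_of_short (by simp [kwV, PySem.Chars.upper]; omega))]
  | cons c t ih =>
    intro p cols hp
    rw [upper_cons]
    by_cases hu : PySem.Chars.upperChar c = kwV.getD p ' '
    · have htake : kwV.take p ++ PySem.Chars.upperChar c :: PySem.Chars.upper t
          = kwV.take (p + 1) ++ PySem.Chars.upper t := by
        rw [hu]
        interval_cases p <;> simp [kwV]
      by_cases h6 : p + 1 = 6
      · have hp5 : p = 5 := by omega
        subst hp5
        have hkfull : kwV.take 6 ++ PySem.Chars.upper t = kwV ++ PySem.Chars.upper t := by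
          simp [kwV]
        rw [scanVals, if_pos hu, if_pos rfl, htake, hkfull,
            if_neg (by rw [find_eq_zero_of_prefix (List.prefix_append _ _)]; omega),
            find_eq_zero_of_prefix (List.prefix_append _ _)]
        simp
      · have hp1 : p + 1 ≤ 5 := by omega
        rw [scanVals, if_pos hu, if_neg h6, ih (p + 1) cols hp1, htake]
        by_cases hone : PySem.Chars.find (kwV.take (p + 1) ++ PySem.Chars.upper t) kwV = -1
        · simp [hone]
        · have hnn : 0 ≤ PySem.Chars.find (kwV.take (p + 1) ++ PySem.Chars.upper t) kwV := by
            have := PySem.Chars.neg_one_le_find (kwV.take (p + 1) ++ PySem.Chars.upper t) kwV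
            omega
          have harith : (PySem.Chars.find (kwV.take (p + 1) ++ PySem.Chars.upper t) kwV).toNat + 6 - p
              = ((PySem.Chars.find (kwV.take (p + 1) ++ PySem.Chars.upper t) kwV).toNat + 6 - (p + 1)) + 1 := by
            omega
          simp only [if_neg hone, harith, List.drop_succ_cons]
    · set d : Nat := if PySem.Chars.upperChar c = 'V' then p else p + 1 with hd
      set p' : Nat := if PySem.Chars.upperChar c = 'V' then 1 else 0 with hp'
      have hlen : (kwV.take p).length = p := by
        simp only [List.length_take, kwV]; simp; omega
      have hdrop : (kwV.take p ++ PySem.Chars.upperChar c :: PySem.Chars.upper t).drop d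
          = kwV.take p' ++ PySem.Chars.upper t := by
        by_cases hV : PySem.Chars.upperChar c = 'V'
        · simp only [hd, hp', if_pos hV]
          rw [List.drop_append_of_le_length (by rw [hlen]),
              List.drop_eq_nil_of_le (by rw [hlen])]
          simp [hV, kwV]
        · simp only [hd, hp', if_neg hV]
          have hsplit : kwV.take p ++ PySem.Chars.upperChar c :: PySem.Chars.upper t
              = (kwV.take p ++ [PySem.Chars.upperChar c]) ++ PySem.Chars.upper t := by simp
          have hlen1 : (kwV.take p ++ [PySem.Chars.upperChar c]).length = p + 1 := by
            simp [hlen]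
          rw [hsplit, List.drop_append_of_le_length (by rw [hlen1]),
              List.drop_eq_nil_of_le (by rw [hlen1])]
          simp
      have hsh := find_shift (s := kwV.take p ++ PySem.Chars.upperChar c :: PySem.Chars.upper t)
        (sub := kwV) d (by
          have := no_occ_before p hp (PySem.Chars.upperChar c) (PySem.Chars.upper t) hu
          rwa [← hd] at this)
      rw [hdrop] at hsh
      rw [scanVals, if_neg hu, ih p' cols (by
        by_cases hV : PySem.Chars.upperChar c = 'V' <;> simp [hp', hV]), hsh]
      by_cases h1 : PySem.Chars.find (kwV.take p' ++ PySem.Chars.upper t) kwV = -1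
      · simp [h1]
      · have hnn : 0 ≤ PySem.Chars.find (kwV.take p' ++ PySem.Chars.upper t) kwV := by
          have := PySem.Chars.neg_one_le_find (kwV.take p' ++ PySem.Chars.upper t) kwV
          omega
        have hne : ((d : Nat) : Int) + PySem.Chars.find (kwV.take p' ++ PySem.Chars.upper t) kwV ≠ -1 := by
          omega
        have harith : (((d : Nat) : Int) + PySem.Chars.find (kwV.take p' ++ PySem.Chars.upper t) kwV).toNat + 6 - p
            = ((PySem.Chars.find (kwV.take p' ++ PySem.Chars.upper t) kwV).toNat + 6 - p') + 1 := by
          by_cases hV : PySem.Chars.upperChar c = 'V'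
          · have hp0 : p ≠ 0 := by
              intro h0
              exact hu (by rw [hV, h0]; rfl)
            simp only [hd, hp', if_pos hV] at hnn ⊢
            omega
          · simp only [hd, hp', if_neg hV] at hnn ⊢
            omega
        simp only [if_neg h1, if_neg hne, harith, List.drop_succ_cons]

-- the two keyword spellings coincide
theorem kw_toList : ("VALUES".toList : List Char) = kwV := by decide

-- ---- the main reduction: A's staged searches equal B's one-pass scan ----

theorem split_insert_core (cs : List Char) :
    split_insert_py (String.ofList cs) = scanOpen cs := by
  rw [scanOpen_eq]
  unfold split_insert_py
  simp only [String.toList_ofList]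
  by_cases h1 : PySem.Chars.find cs ['('] = -1
  · simp [h1]
  · have h1n : 0 ≤ PySem.Chars.find cs ['('] := by
      have := PySem.Chars.neg_one_le_find cs ['(']; omega
    have hfi : PySem.Chars.find cs ['('] = ((PySem.Chars.find cs ['(']).toNat : Int) :=
      (Int.toNat_of_nonneg h1n).symm
    set i := (PySem.Chars.find cs ['(']).toNat with hi
    have hilt : i < cs.length := find_toNat_lt (by simp) h1n
    have hff : PySem.Chars.findFrom cs [')'] ((i : Int) + 1) none
        = if PySem.Chars.find (cs.drop (i + 1)) [')'] = -1 then -1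
          else (i : Int) + 1 + PySem.Chars.find (cs.drop (i + 1)) [')'] := by
      have hcast : ((i : Int) + 1) = ((i + 1 : Nat) : Int) := by push_cast; ring
      rw [hcast, PySem.Chars.findFrom_natCast cs [')'] (i + 1) (by omega)]
    set after := cs.drop (i + 1) with hafter
    rw [scanCols_eq after [] [] (by simp)]
    by_cases h2 : PySem.Chars.find after [')'] = -1
    · simp [hfi, hff, h2]
    · have h2n : 0 ≤ PySem.Chars.find after [')'] := by
        have := PySem.Chars.neg_one_le_find after [')']; omega
      have hfj : PySem.Chars.find after [')'] = ((PySem.Chars.find after [')']).toNat : Int) :=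
        (Int.toNat_of_nonneg h2n).symm
      set j := (PySem.Chars.find after [')']).toNat with hj
      have hne2 : ¬ ((i : Int) + 1 + PySem.Chars.find after [')'] = -1) := by omega
      have hcols : PySem.List.slice cs (some ((i : Int) + 1))
          (some ((i : Int) + 1 + PySem.Chars.find after [')'])) = after.take j := by
        rw [hfj, PySem.List.slice_toNat cs (by omega) (by omega), hafter]
        all_goals (congr 1; omega)
      have hrest : PySem.List.slice cs
          (some ((i : Int) + 1 + PySem.Chars.find after [')'] + 1)) none
          = after.drop (j + 1) := by
        rw [hfj, PySem.List.slice_from cs (by omega), hafter, List.drop_drop]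
        all_goals congr 1
      set rest := after.drop (j + 1) with hrestdef
      rw [scanVals_eq rest 0 _ (by omega)]
      simp only [List.take_zero, List.nil_append, kw_toList]
      by_cases h3 : PySem.Chars.find (PySem.Chars.upper rest) kwV = -1
      · have h3' : PySem.Chars.find (PySem.Chars.upper rest) kwV < 0 := by omega
        simp [hfi, hff, h2, hne2, hrest, h3]
      · have h3n : 0 ≤ PySem.Chars.find (PySem.Chars.upper rest) kwV := by
          have := PySem.Chars.neg_one_le_find (PySem.Chars.upper rest) kwV; omega
        have h3' : ¬ PySem.Chars.find (PySem.Chars.upper rest) kwV < 0 := by omega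
        have hblob : PySem.List.slice rest
            (some (PySem.Chars.find (PySem.Chars.upper rest) kwV + 6)) none
            = rest.drop ((PySem.Chars.find (PySem.Chars.upper rest) kwV).toNat + 6 - 0) := by
          rw [PySem.List.slice_from rest (by omega)]
          congr 1
          omega
        simp [hfi, hff, h2, hne2, hcols, hrest, h3, h3', hblob]

-- ===== VERDICT (by name: the statement is the Claim_ definition above) =====
theorem split_insert_py_spec : Claim_equal_split_insert_py := by
  intro chunk _
  unfold Spec_split_insert_py split_insert_py_alt
  have := split_insert_core chunk.toList
  rwa [String.ofList_toList] at this
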